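-- pv_equiv track=rewrite | github.com/rayoz6546/Rayan | Introduction Programming/Lab7/Problem3 Lab7.py | primesCount
-- ===== SOURCE A (Python) =====
-- def generatePrimes(n):
--     B=[True for k in range(n)]
--     B[1]=False
--     B[0]=False
--     w=2
--     while(w**2<n):
--         if B[w]==True:
--             B.append(w)
--             for j in range(w**2,n,w):
--                 B[j]=False
--         w+=1
--     P=[]
--     for i in range(2,n):
--         if B[i]==True:
--             P.append(i)
--     return (P,B)
--
-- def primesCount(n):
--     (P,B)=generatePrimes(n)
--     y=[]
--     for i in range(n+1):
--         numberOfPrimesCount=0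
--         for j in range(i):
--             if B[j]==True:
--                 numberOfPrimesCount+=1
--         y.append(numberOfPrimesCount)
--     return y
-- ===== SOURCE B (Python) =====
-- def primesCount(n):
--     # Same sieve, but the n+1 prefix counts are produced by one running sum
--     # over the sieve instead of recounting from scratch for every i.
--     sieve = [True] * n
--     sieve[1] = False
--     sieve[0] = False
--     w = 2
--     while w * w < n:
--         if sieve[w]:
--             for j in range(w * w, n, w):
--                 sieve[j] = False
--         w += 1
--     y = []
--     c = 0
--     for b in sieve:
--         y.append(c)
--         c += b
--     y.append(c)
--     return y
-- ===== Notes on version B (the rewrite author's own statement) =====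
-- stated objective: faster
-- what changed: The n+1 prefix counts are produced by a single running sum over the sieve booleans instead of recounting the sieve prefix from scratch for every i (nested loop).
import Mathlib
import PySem

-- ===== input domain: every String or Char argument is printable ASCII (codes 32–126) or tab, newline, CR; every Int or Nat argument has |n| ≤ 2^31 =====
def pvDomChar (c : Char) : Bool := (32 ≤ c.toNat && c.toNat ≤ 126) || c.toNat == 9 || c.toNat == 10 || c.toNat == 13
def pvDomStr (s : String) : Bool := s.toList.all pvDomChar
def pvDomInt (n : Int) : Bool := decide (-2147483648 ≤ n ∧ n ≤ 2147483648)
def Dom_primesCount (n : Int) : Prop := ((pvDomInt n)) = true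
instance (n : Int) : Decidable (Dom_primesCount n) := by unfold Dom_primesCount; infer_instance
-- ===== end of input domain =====

-- B (the alt) replaces A's quadratic per-i recount of the sieve prefix by one running sum
-- over the sieve booleans (objective: faster; the sieve itself is the same in both).

-- ===== PORT A =====
-- A's list B mixes booleans with the prime ints it appends ('B.append(w)'); it is encoded as
-- List Int with True ↦ 1, False ↦ 0, appended prime w ↦ w.  This is exact: Python's
-- 'B[j]==True' holds iff the entry equals 1 (int w == True iff w == 1, and appended w ≥ 2).
-- 'B[j]=False' at 0 ≤ j < n is List.set j.toNat 0 (index always non-negative and in range here).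
def sieveA (n w : Int) (B : List Int) : List Int :=
  if _h : w * w < n then
    sieveA n (w + 1)
      (if PySem.List.pyGet? B w = some 1 then
        (PySem.List.pyRange (w * w) n w).foldl (fun B j => B.set j.toNat 0) (B ++ [w])
       else B)
  else B
termination_by (n - w).toNat
decreasing_by
  have hw : w < n := by nlinarith [mul_self_nonneg (w - 1)]
  omega

def generatePrimes (n : Int) : List Int × List Int :=
  let B0 := ((List.replicate n.toNat 1).set 1 0).set 0 0
  let B := sieveA n 2 B0
  let P := (PySem.List.pyRange 2 n 1).foldl
      (fun P i => if PySem.List.pyGet? B i = some 1 then P ++ [i] else P) []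
  (P, B)

def primesCount (n : Int) : List Int :=
  let B := (generatePrimes n).2
  (PySem.List.pyRange 0 (n + 1) 1).foldl (fun y i =>
    y ++ [(PySem.List.pyRange 0 i 1).foldl
            (fun c j => if PySem.List.pyGet? B j = some 1 then c + 1 else c) 0]) []

-- ===== PORT B =====
def sieveB (n w : Int) (s : List Bool) : List Bool :=
  if _h : w * w < n then
    sieveB n (w + 1)
      (if PySem.List.pyGet? s w = some true then
        (PySem.List.pyRange (w * w) n w).foldl (fun s j => s.set j.toNat false) s
       else s)
  else s
termination_by (n - w).toNat
decreasing_by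
  have hw : w < n := by nlinarith [mul_self_nonneg (w - 1)]
  omega

def primesCount_alt (n : Int) : List Int :=
  let s0 := ((List.replicate n.toNat true).set 1 false).set 0 false
  let s := sieveB n 2 s0
  let yc := s.foldl
      (fun (acc : List Int × Int) b => (acc.1 ++ [acc.2], acc.2 + (if b then 1 else 0)))
      ([], 0)
  yc.1 ++ [yc.2]

-- ===== PRECONDITION & SPEC =====
-- Pre_ excludes exactly n < 2, where Python A raises IndexError at 'B[1]=False'.
def Pre_primesCount (n : Int) : Prop := 2 ≤ n
instance (n : Int) : Decidable (Pre_primesCount n) := by unfold Pre_primesCount; infer_instance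
def pvWitness_primesCount : Int := 10

def Spec_primesCount (n : Int) (out : List Int) : Prop := out = primesCount_alt n
instance (n : Int) (out : List Int) : Decidable (Spec_primesCount n out) := by unfold Spec_primesCount; infer_instance

-- ===== CLAIM (what is proved, stated in full; the proofs are below) =====
def Claim_equal_primesCount : Prop := ∀ (n : Int), Dom_primesCount n → Pre_primesCount n → Spec_primesCount n (primesCount n)

-- ===== LEMMAS AND PROOFS =====

-- encoding of B's booleans into A's ints
def pvEnc (b : Bool) : Int := if b then 1 else 0

-- running-sum value: number of set entries, as the Int A accumulates
def pvC (l : List Bool) : Int := (l.map pvEnc).sum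

theorem pvGet_rel (s : List Bool) (t : List Int) (j : Int) (h0 : 0 ≤ j)
    (hl : j.toNat < s.length) :
    (PySem.List.pyGet? (s.map pvEnc ++ t) j = some 1) ↔
      (PySem.List.pyGet? s j = some true) := by
  rw [PySem.List.pyGet?_of_nonneg _ h0, PySem.List.pyGet?_of_nonneg _ h0,
      List.getElem?_append_left (by simpa using hl), List.getElem?_map]
  cases h : s[j.toNat] <;> simp [pvEnc]

theorem pvMark_len (r : List Int) (s : List Bool) :
    (r.foldl (fun s j => s.set j.toNat false) s).length = s.length := by
  induction r generalizing s with
  | nil => rfl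
  | cons j r ih => simp [List.foldl_cons, ih]

theorem pvMark_rel (r : List Int) (s : List Bool) (u : List Int)
    (hr : ∀ j ∈ r, 0 ≤ j ∧ j.toNat < s.length) :
    r.foldl (fun B j => B.set j.toNat 0) (s.map pvEnc ++ u) =
      (r.foldl (fun s j => s.set j.toNat false) s).map pvEnc ++ u := by
  induction r generalizing s with
  | nil => rfl
  | cons j r ih =>
    obtain ⟨h0, hl⟩ := hr j (by simp)
    simp only [List.foldl_cons]
    rw [List.set_append, if_pos (by simpa using hl),
        show (List.map pvEnc s).set j.toNat 0 = (s.set j.toNat false).map pvEnc by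
          rw [List.map_set]; rfl]
    exact ih _ (fun j hj => by simpa using hr j (by simp [hj]))

theorem pvSieveB_len (n w : Int) (s : List Bool) : (sieveB n w s).length = s.length := by
  rw [sieveB]
  split
  · rw [pvSieveB_len]
    split <;> simp [pvMark_len]
  · rfl
termination_by (n - w).toNat
decreasing_by
  have hw : w < n := by nlinarith [mul_self_nonneg (w - 1)]
  omega

theorem sieve_rel (n : Int) : ∀ (m : Nat) (w : Int) (s : List Bool) (t : List Int),
    (n - w).toNat ≤ m → 2 ≤ w → s.length = n.toNat →
    ∃ t', sieveA n w (s.map pvEnc ++ t) = (sieveB n w s).map pvEnc ++ t' := by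
  intro m
  induction m with
  | zero =>
    intro w s t hm hw hl
    have hnw : ¬ w * w < n := by
      have : n ≤ w := by omega
      nlinarith
    rw [sieveA, sieveB, dif_neg hnw, dif_neg hnw]
    exact ⟨t, rfl⟩
  | succ m ih =>
    intro w s t hm hw hl
    by_cases hc : w * w < n
    · have hw0 : (0:Int) ≤ w := by omega
      have hwn : w < n := by nlinarith [mul_self_nonneg (w - 1)]
      have hwl : w.toNat < s.length := by omega
      rw [sieveA, sieveB, dif_pos hc, dif_pos hc]
      by_cases hg : PySem.List.pyGet? s w = some true
      · have hgA : PySem.List.pyGet? (s.map pvEnc ++ t) w = some 1 :=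
          (pvGet_rel s t w hw0 hwl).mpr hg
        rw [if_pos hgA, if_pos hg, List.append_assoc,
            pvMark_rel _ s (t ++ [w]) ?bounds]
        case bounds =>
          intro j hj
          rw [PySem.List.mem_pyRange_iff_of_pos (by omega)] at hj
          have h1 : (0:Int) ≤ j := by nlinarith [hj.1]
          exact ⟨h1, by omega⟩
        exact ih (w + 1) _ (t ++ [w]) (by omega) (by omega)
          (by rw [pvMark_len]; exact hl)
      · have hgA : ¬ PySem.List.pyGet? (s.map pvEnc ++ t) w = some 1 := by
          rw [pvGet_rel s t w hw0 hwl]; exact hg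
        rw [if_neg hgA, if_neg hg]
        exact ih (w + 1) s t (by omega) (by omega) hl
    · rw [sieveA, sieveB, dif_neg hc, dif_neg hc]
      exact ⟨t, rfl⟩

theorem pvCnt_eq (sB : List Bool) (t' : List Int) :
    ∀ (k : Nat), k ≤ sB.length →
    (PySem.List.pyRange 0 (k : Int) 1).foldl
        (fun c j => if PySem.List.pyGet? (sB.map pvEnc ++ t') j = some 1 then c + 1 else c) 0
      = pvC (sB.take k) := by
  intro k
  induction k with
  | zero => simp [PySem.List.pyRange_one_eq_nil, pvC]
  | succ k ih =>
    intro hk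
    have hk' : k < sB.length := hk
    have hcast : ((k + 1 : Nat) : Int) = (k : Int) + 1 := by push_cast; ring
    rw [hcast, PySem.List.pyRange_one_succ_right (by positivity), List.foldl_append]
    rw [ih (by omega)]
    rw [List.take_add_one, List.getElem?_eq_getElem hk']
    have hget : PySem.List.pyGet? sB (k : Int) = some sB[k] := by
      rw [PySem.List.pyGet?_of_nonneg _ (by positivity)]
      simp [hk']
    simp only [List.foldl_cons, List.foldl_nil, Option.toList_some]
    by_cases hb : sB[k] = true
    · rw [if_pos ((pvGet_rel sB t' (k : Int) (by positivity) (by simpa using hk')).mpr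
        (by rw [hget, hb]))]
      simp [pvC, pvEnc, hb]
    · rw [if_neg (by
        rw [pvGet_rel sB t' (k : Int) (by positivity) (by simpa using hk'), hget]
        simp [hb])]
      simp [pvC, pvEnc, hb]

theorem pvFoldacc (l : List Bool) : ∀ (y0 : List Int) (c0 : Int),
    l.foldl (fun (acc : List Int × Int) b => (acc.1 ++ [acc.2], acc.2 + (if b then 1 else 0)))
      (y0, c0)
    = (y0 ++ (List.range l.length).map (fun k => c0 + pvC (l.take k)), c0 + pvC l) := by
  induction l with
  | nil => intro y0 c0; simp [pvC]
  | cons b l ih =>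
    intro y0 c0
    rw [List.foldl_cons, ih]
    refine congrArg₂ Prod.mk ?_ (by simp [pvC, pvEnc]; ring)
    rw [List.length_cons, List.range_succ_eq_map, List.map_cons, List.map_map,
        List.append_assoc, List.singleton_append]
    congr 1
    · simp [pvC]
      intro a ha
      cases b <;> simp [pvEnc] <;> ring

theorem primesCount_eq (n : Int) (h : 2 ≤ n) : primesCount n = primesCount_alt n := by
  have hs0len : (((List.replicate n.toNat true).set 1 false).set 0 false).length = n.toNat := by
    simp
  obtain ⟨t', ht'⟩ :=
    sieve_rel n (n - 2).toNat 2 (((List.replicate n.toNat true).set 1 false).set 0 false) []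
      (le_refl _) (by omega) hs0len
  rw [List.append_nil] at ht'
  set sB := sieveB n 2 (((List.replicate n.toNat true).set 1 false).set 0 false) with hsB
  have hsBlen : sB.length = n.toNat := by rw [hsB, pvSieveB_len]; exact hs0len
  have hB0 : ((List.replicate n.toNat 1).set 1 0).set 0 0
      = (((List.replicate n.toNat true).set 1 false).set 0 false).map pvEnc := by
    rw [List.map_set, List.map_set, List.map_replicate]; rfl
  have hgen : (generatePrimes n).2 = sB.map pvEnc ++ t' := by
    show sieveA n 2 (((List.replicate n.toNat 1).set 1 0).set 0 0) = _
    rw [hB0, ht']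
  have hA0 : primesCount n = (PySem.List.pyRange 0 (n + 1) 1).foldl
      (fun y i => y ++ [(PySem.List.pyRange 0 i 1).foldl
        (fun c j => if PySem.List.pyGet? ((generatePrimes n).2) j = some 1 then c + 1 else c) 0])
      [] := rfl
  rw [hA0, hgen,
    PySem.List.foldl_append_singleton_eq_map
      (f := fun i => (PySem.List.pyRange 0 i 1).foldl
        (fun c j => if PySem.List.pyGet? (sB.map pvEnc ++ t') j = some 1 then c + 1 else c) 0),
    List.nil_append]
  have hcast : (n + 1 : Int) = ((n.toNat + 1 : Nat) : Int) := by omega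
  rw [hcast, PySem.List.pyRange_zero_natCast, List.map_map, List.range_succ, List.map_append,
    List.map_singleton]
  have hB1 : primesCount_alt n
      = (sB.foldl (fun (acc : List Int × Int) b =>
          (acc.1 ++ [acc.2], acc.2 + (if b then 1 else 0))) ([], 0)).1
        ++ [(sB.foldl (fun (acc : List Int × Int) b =>
          (acc.1 ++ [acc.2], acc.2 + (if b then 1 else 0))) ([], 0)).2] := rfl
  rw [hB1, pvFoldacc, List.nil_append]
  simp only [zero_add, hsBlen]
  congr 1
  · apply List.map_congr_left
    intro k hk
    rw [List.mem_range] at hk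
    exact pvCnt_eq sB t' k (by omega)
  · rw [Function.comp_apply]
    rw [pvCnt_eq sB t' n.toNat (by omega)]
    rw [List.take_of_length_le (by omega)]

-- ===== VERDICT (by name: the statement is the Claim_ definition above) =====
theorem primesCount_spec : Claim_equal_primesCount := by
  intro n _ hp
  exact primesCount_eq n hp
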